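-- pv_equiv track=rewrite | github.com/hon99oo/PythonAlgorithmStudy | 코테/오늘의집/solution2.py | solution
-- ===== SOURCE A (Python) =====
-- def solution(call):
--     # 대소문자 구분 없이 체크하기 위해 소문자로 통일
--     lower_call = call.lower()
--
--     # 알파벳 하나 기준 문자열에 몇개 있는지 체크
--     call_list = list(set(lower_call))
--     count_list = []
--     for c in call_list:
--         count_list.append((c,lower_call.count(c)))
--
--     # 가장 많이 존재하는 문자 모두 remove_set에 저장
--     count_list.sort(key=lambda x: x[1], reverse=True)
--     remove_set = set()
--     for s in count_list:
--         if s[1] == count_list[0][1]: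
--             remove_set.add(s[0])
--
--     # remove_set에 포함된 알파벳(대소문자) 제거
--     answer = ''.join([i for i in call if not i.lower() in remove_set])
--     return answer
-- ===== SOURCE B (Python) =====
-- def solution(call):
--     low = call.lower()
--     freq = {}
--     for ch in low:
--         freq[ch] = freq.get(ch, 0) + 1
--     mx = max(freq.values(), default=0)
--     remove = {ch for ch, c in freq.items() if c == mx}
--     return ''.join(ch for ch in call if ch.lower() not in remove)
-- ===== Notes on version B (the rewrite author's own statement) =====
-- stated objective: simpler
-- what changed: B replaces A's per-distinct-char .count() rescans, the descending sort and the scan comparing each count with the sorted head with a single counting pass over the lowered string, a direct max over the counts (default=0, so no empty-string case), and one selection pass over the dict items.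
import Mathlib
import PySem

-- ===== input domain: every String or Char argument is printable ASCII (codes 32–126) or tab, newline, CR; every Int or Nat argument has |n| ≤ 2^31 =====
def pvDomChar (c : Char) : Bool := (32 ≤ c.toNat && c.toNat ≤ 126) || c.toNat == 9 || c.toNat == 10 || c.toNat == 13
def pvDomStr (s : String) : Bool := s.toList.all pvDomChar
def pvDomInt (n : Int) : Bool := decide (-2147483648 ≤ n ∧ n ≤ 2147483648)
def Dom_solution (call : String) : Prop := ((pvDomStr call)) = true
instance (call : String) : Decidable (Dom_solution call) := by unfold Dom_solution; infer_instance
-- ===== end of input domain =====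

-- B replaces A's per-distinct-char rescans + descending sort + 'equal to sorted[0]' scan by one
-- counting pass, a direct max of the counts (default 0), and one selection pass (objective: simpler).


-- ===== PORT A =====
-- 'lower_call.count(c)' for the 1-char string c is the character count (exact); the in-place
-- count_list.sort(...) is rebinding to the sorted list; ''.join of the kept 1-char strings is
-- String.mk of the kept chars; i.lower() on one char is lowerChar (exact on the ASCII domain).
-- count_list[0] inside the loop: pyGetD's default is never reached (the loop body only runs on a
-- nonempty list), matching Python, where the empty loop never evaluates count_list[0].
def solution (call : String) : String :=
  let lower_call : List Char := PySem.Chars.lower call.toList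
  let call_list : PySem.Set Char := PySem.Set.ofList lower_call
  let count_list : List (Char × Int) :=
    call_list.foldl (fun acc c => acc ++ [(c, (lower_call.count c : Int))]) []
  let count_sorted : List (Char × Int) := PySem.List.sorted count_list (fun t => t.2) true
  let remove_set : PySem.Set Char :=
    count_sorted.foldl
      (fun rs s =>
        if s.2 == (PySem.List.pyGetD count_sorted 0 (' ', 0)).2 then PySem.Set.add rs s.1 else rs)
      PySem.Set.empty
  String.mk (call.toList.filter (fun i => !(PySem.Set.contains remove_set (PySem.Chars.lowerChar i))))

-- ===== PORT B =====
def solution_alt (call : String) : String :=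
  let low : List Char := PySem.Chars.lower call.toList
  let freq : PySem.Dict Char Int :=
    low.foldl (fun d ch => d.insert ch (d.getD ch 0 + 1)) PySem.Dict.empty
  let mx : Int := PySem.List.maxD freq.values (fun v => v) 0
  let remove : PySem.Set Char :=
    PySem.Set.ofList ((freq.items.filter (fun p => p.2 == mx)).map (·.1))
  String.mk (call.toList.filter (fun ch => !(PySem.Set.contains remove (PySem.Chars.lowerChar ch))))

-- ===== PRECONDITION & SPEC =====
def Spec_solution (call : String) (out : String) : Prop := out = solution_alt call
instance (call : String) (out : String) : Decidable (Spec_solution call out) := by unfold Spec_solution; infer_instance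

-- ===== CLAIM (what is proved, stated in full; the proofs are below) =====
def Claim_equal_solution : Prop := ∀ (call : String), Dom_solution call → Spec_solution call (solution call)

-- ===== LEMMAS AND PROOFS =====

-- proof-side names for the two programs' intermediate values
def pvCnt (L : List Char) : List (Char × Int) :=
  (PySem.Set.ofList L).foldl (fun acc c => acc ++ [(c, (L.count c : Int))]) []

def pvSrt (L : List Char) : List (Char × Int) := PySem.List.sorted (pvCnt L) (fun t => t.2) true

def pvRemoveA (L : List Char) : PySem.Set Char :=
  (pvSrt L).foldl
    (fun rs s => if s.2 == (PySem.List.pyGetD (pvSrt L) 0 (' ', 0)).2 then PySem.Set.add rs s.1 else rs)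
    PySem.Set.empty

def pvFreq (L : List Char) : PySem.Dict Char Int :=
  L.foldl (fun d ch => d.insert ch (d.getD ch 0 + 1)) PySem.Dict.empty

def pvMx (L : List Char) : Int := PySem.List.maxD (pvFreq L).values (fun v => v) 0

def pvRemoveB (L : List Char) : PySem.Set Char :=
  PySem.Set.ofList (((pvFreq L).items.filter (fun p => p.2 == pvMx L)).map (·.1))

theorem pvCnt_eq (L : List Char) :
    pvCnt L = (PySem.Set.ofList L).map (fun c => (c, (L.count c : Int))) := by
  rw [pvCnt, PySem.List.foldl_append_singleton_eq_map, List.nil_append]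

theorem pvItems_eq (L : List Char) : (pvFreq L).items = pvCnt L := by
  rw [pvCnt_eq]
  rw [show pvFreq L = PySem.Dict.counter L from
    PySem.Dict.foldl_insert_getD_add_one_eq_counter L]
  exact PySem.Dict.items_counter L

theorem mem_pvRemoveA (L : List Char) (x : Char) :
    x ∈ pvRemoveA L ↔
      ∃ b ∈ pvCnt L, b.2 = (PySem.List.pyGetD (pvSrt L) 0 (' ', 0)).2 ∧ x = b.1 := by
  unfold pvRemoveA
  rw [PySem.List.foldl_if_eq_foldl_filter
        (p := fun s : Char × Int => s.2 == (PySem.List.pyGetD (pvSrt L) 0 (' ', 0)).2)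
        (f := fun rs s => PySem.Set.add rs s.1)]
  rw [PySem.Set.mem_foldl_add]
  simp [List.mem_filter, PySem.List.mem_sorted, pvSrt]

theorem mem_pvRemoveB (L : List Char) (x : Char) :
    x ∈ pvRemoveB L ↔ ∃ b ∈ pvCnt L, b.2 = pvMx L ∧ x = b.1 := by
  unfold pvRemoveB
  rw [PySem.Set.mem_ofList, pvItems_eq]
  simp [List.mem_filter]

-- the head of the reverse-sorted count list carries the maximum count
theorem pvHead_eq_mx (L : List Char) (h : pvCnt L ≠ []) :
    (PySem.List.pyGetD (pvSrt L) 0 (' ', 0)).2 = pvMx L := by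
  have hs : pvSrt L ≠ [] := by
    simpa [pvSrt, PySem.List.sorted_eq_nil_iff] using h
  obtain ⟨m, t, hmt⟩ := List.exists_cons_of_ne_nil hs
  have hhd : PySem.List.pyGetD (pvSrt L) 0 (' ', 0) = m := by
    rw [hmt]; exact PySem.List.pyGetD_zero_cons ..
  have hge : ∀ y ∈ pvCnt L, y.2 ≤ m.2 :=
    PySem.List.key_head_sorted_rev_ge (pvCnt L) (fun t => t.2) (by rw [show PySem.List.sorted (pvCnt L) (fun t => t.2) true = pvSrt L from rfl]; exact hmt)
  have hmmem : m ∈ pvCnt L := by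
    have hm : m ∈ pvSrt L := by rw [hmt]; exact List.mem_cons_self
    rwa [pvSrt, PySem.List.mem_sorted] at hm
  have hvals : (pvFreq L).values = (pvCnt L).map (fun p => p.2) := by
    simp only [PySem.Dict.values]; rw [pvItems_eq]
  cases hmax : PySem.List.max? (pvFreq L).values (fun v => v) with
  | none =>
      exact absurd (((PySem.List.max?_eq_none_iff _ _).mp hmax).symm ▸ hvals.symm)
        (by simp [h])
  | some v =>
      have hveq : pvMx L = v := by
        unfold pvMx PySem.List.maxD; rw [hmax]; rfl
      have hv_mem : v ∈ (pvCnt L).map (fun p => p.2) := by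
        rw [← hvals]; exact PySem.List.max?_mem hmax
      obtain ⟨b, hb, hbv⟩ := List.mem_map.mp hv_mem
      have h1 : v ≤ m.2 := hbv ▸ hge b hb
      have h2 : m.2 ≤ v := by
        have := PySem.List.max?_isMax hmax m.2 ?_
        · exact this
        · rw [hvals]; exact List.mem_map.mpr ⟨m, hmmem, rfl⟩
      rw [hhd, hveq]; exact le_antisymm h2 h1

theorem contains_eq (L : List Char) (x : Char) :
    PySem.Set.contains (pvRemoveA L) x = PySem.Set.contains (pvRemoveB L) x := by
  rw [Bool.eq_iff_iff, PySem.Set.contains_iff, PySem.Set.contains_iff,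
      mem_pvRemoveA, mem_pvRemoveB]
  by_cases h : pvCnt L = []
  · simp [h]
  · rw [pvHead_eq_mx L h]


-- ===== VERDICT (by name: the statement is the Claim_ definition above) =====
theorem solution_spec : Claim_equal_solution := by
  intro call _
  show solution call = solution_alt call
  have hA : solution call = String.mk ((call.toList).filter
      (fun i => !(PySem.Set.contains (pvRemoveA (PySem.Chars.lower call.toList)) (PySem.Chars.lowerChar i)))) := rfl
  have hB : solution_alt call = String.mk ((call.toList).filter
      (fun i => !(PySem.Set.contains (pvRemoveB (PySem.Chars.lower call.toList)) (PySem.Chars.lowerChar i)))) := rfl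
  rw [hA, hB]
  congr 1
  exact List.filter_congr (fun i _ => by rw [contains_eq])
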